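-- pv_equiv track=rewrite | github.com/arita37/cli_code | cli_code/cli_format2.py | format_assignments
-- ===== SOURCE A (Python) =====
-- def format_assignments(text):
--     """
--     Aligns assignment statements in the source file and return a text.
--     """
--     lines = text.split("\n")
--
--     # process text line by and store each line at its starting index
--     formated_text = []
--     a_block_left = []
--     a_block_right = []
--
--     # these statements may contain = too are not assignment
--     skip_tokens = ['if', 'for', 'while', '(', ')']
--
--     def format_assignment_block():
--         """
--         Process an assignment block, returns formatted list of
--         assignment lines in that block.
--         """
--         max_left = max([len(left) for left in a_block_left])
--         f_assignments = []
--         for left, right in zip(a_block_left, a_block_right):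
--             new_line = left + ' '*(max_left-len(left)) + ' = ' + right
--             f_assignments.append(new_line)
--         return f_assignments
--
--     for line in lines:
--         # assignment should contain = and shouldn't contain anything from skip_tokens
--         # empty list is considered false
--         if "=" in line and not ["bad" for t in skip_tokens if t in line.split("=")[0]]:
--             left = line.split("=")[0]
--             right = line.split("=")[-1]
--
--             # need to preserve spaces on left
--             a_block_left.append(left.rstrip())
--             a_block_right.append(right.strip())
--
--         else:
--             # if not assingment, process the block if not empty
--             if len(a_block_left) != 0:
--                 f_assignments = format_assignment_block()
--                 formated_text.extend(f_assignments)
--                 a_block_left = []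
--                 a_block_right = []
--             # if not assingment, preserve the line
--             formated_text.append(line)
--
--     # check if the block is non empty at the end
--     # because the else will not trigger if assignment lines are at the last
--     if len(a_block_left) != 0:
--         f_assignments = format_assignment_block()
--         formated_text.extend(f_assignments)
--
--     # join individual lines in list and returns as text string
--     return '\n'.join(formated_text)
-- ===== SOURCE B (Python) =====
-- def format_assignments(text):
--     """
--     Aligns assignment statements in the source file and return a text.
--     """
--     skip_tokens = ['if', 'for', 'while', '(', ')']
--
--     def is_assignment(line):
--         return "=" in line and not any(t in line.split("=")[0] for t in skip_tokens)
--
--     def left_of(line):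
--         return line.split("=")[0].rstrip()
--
--     def right_of(line):
--         return line.split("=")[-1].strip()
--
--     def format_block(lefts, rights):
--         width = max(len(l) for l in lefts)
--         return [l + ' ' * (width - len(l)) + ' = ' + r for l, r in zip(lefts, rights)]
--
--     lines = text.split("\n")
--     out = []
--     i, n = 0, len(lines)
--     # walk maximal runs of lines sharing the same classification
--     while i < n:
--         flag = is_assignment(lines[i])
--         j = i + 1
--         while j < n and is_assignment(lines[j]) == flag:
--             j += 1
--         run = lines[i:j]
--         if flag:
--             out.extend(format_block([left_of(l) for l in run],
--                                     [right_of(l) for l in run]))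
--         else:
--             out.extend(run)
--         i = j
--     return '\n'.join(out)
-- ===== Notes on version B (the rewrite author's own statement) =====
-- stated objective: alternative
-- what changed: B replaces A's per-line state machine (pending left/right block lists flushed on non-assignment lines and at EOF) with a run-based pass that splits the lines into maximal consecutive runs of like-classified lines and formats each assignment run in one step.
import Mathlib
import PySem

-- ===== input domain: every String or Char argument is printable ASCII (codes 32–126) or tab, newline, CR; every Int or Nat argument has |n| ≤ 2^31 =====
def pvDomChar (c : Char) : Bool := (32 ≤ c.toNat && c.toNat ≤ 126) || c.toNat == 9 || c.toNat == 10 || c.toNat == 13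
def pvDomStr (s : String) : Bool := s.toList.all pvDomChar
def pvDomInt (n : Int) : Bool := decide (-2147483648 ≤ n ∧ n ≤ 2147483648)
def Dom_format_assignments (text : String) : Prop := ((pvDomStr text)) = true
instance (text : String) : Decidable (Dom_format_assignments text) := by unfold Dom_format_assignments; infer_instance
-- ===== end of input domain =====

-- B re-implements A's per-line state machine as a grouping pass over maximal runs of
-- like-classified lines (alternative decomposition, same cost); return values proved equal.

-- shared helpers (both Pythons compute these identical sub-expressions)
-- s.split(sep): sep is a non-empty literal, so split? is always `some`
def pvSplitEq (line : String) : List String := (PySem.Str.split? line "=").getD []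
def pvSplitNL (text : String) : List String := (PySem.Str.split? text "\n").getD []
def pvSkipTokens : List String := ["if", "for", "while", "(", ")"]

def pvLeftOf (line : String) : String :=
  PySem.Str.rstrip (PySem.List.pyGetD (pvSplitEq line) 0 "")

def pvRightOf (line : String) : String :=
  PySem.Str.strip (PySem.List.pyGetD (pvSplitEq line) (-1) "")

def pvFmtBlock (bl br : List String) : List String :=
  let maxLeft : Int := (PySem.List.max? (bl.map PySem.Str.len) (fun x => x)).getD 0
  (bl.zip br).map (fun p =>
    p.1 ++ String.ofList (List.replicate (maxLeft - PySem.Str.len p.1).toNat ' ') ++ " = " ++ p.2)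

-- ===== PORT A =====
-- A's classifier: '=' in line and the "bad"-comprehension over skip tokens is empty
def pvIsAssignA (line : String) : Bool :=
  PySem.Str.isIn "=" line &&
    ((pvSkipTokens.filter
        (fun t => PySem.Str.isIn t (PySem.List.pyGetD (pvSplitEq line) 0 ""))).map
      (fun _ => "bad") == ([] : List String))

-- the for-loop with its state (formated_text, a_block_left, a_block_right)
def pvALoop : List String → List String → List String → List String →
    List String × List String × List String
  | formatted, bl, br, [] => (formatted, bl, br)
  | formatted, bl, br, line :: rest =>
    if pvIsAssignA line then
      pvALoop formatted (bl ++ [pvLeftOf line]) (br ++ [pvRightOf line]) rest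
    else
      let formatted' := if bl.length ≠ 0 then formatted ++ pvFmtBlock bl br else formatted
      pvALoop (formatted' ++ [line]) [] [] rest

def format_assignments (text : String) : String :=
  let lines := pvSplitNL text
  let r := pvALoop [] [] [] lines
  PySem.Str.join "\n" (if r.2.1.length ≠ 0 then r.1 ++ pvFmtBlock r.2.1 r.2.2 else r.1)

-- ===== PORT B =====
-- B's classifier: '=' in line and no skip token occurs in the part before the first '='
def pvIsAssignB (line : String) : Bool :=
  PySem.Str.isIn "=" line &&
    !(pvSkipTokens.any
      (fun t => PySem.Str.isIn t (PySem.List.pyGetD (pvSplitEq line) 0 "")))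

-- walk maximal runs of lines sharing the same classification
def pvBGo : List String → List String
  | [] => []
  | l :: t =>
    let flag := pvIsAssignB l
    let run := l :: t.takeWhile (fun x => pvIsAssignB x == flag)
    let rest := t.dropWhile (fun x => pvIsAssignB x == flag)
    (if flag then pvFmtBlock (run.map pvLeftOf) (run.map pvRightOf) else run) ++ pvBGo rest
termination_by ls => ls.length
decreasing_by
  have := (List.dropWhile_sublist (l := t) (p := fun x => pvIsAssignB x == pvIsAssignB l)).length_le
  simp; omega

def format_assignments_alt (text : String) : String :=
  PySem.Str.join "\n" (pvBGo (pvSplitNL text))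

-- ===== PRECONDITION & SPEC =====
def Spec_format_assignments (text : String) (out : String) : Prop := out = format_assignments_alt text
instance (text : String) (out : String) : Decidable (Spec_format_assignments text out) := by unfold Spec_format_assignments; infer_instance

-- ===== CLAIM (what is proved, stated in full; the proofs are below) =====
def Claim_equal_format_assignments : Prop := ∀ (text : String), Dom_format_assignments text → Spec_format_assignments text (format_assignments text)

-- ===== LEMMAS AND PROOFS =====

theorem pvPred_eq (line : String) : pvIsAssignA line = pvIsAssignB line := by
  unfold pvIsAssignA pvIsAssignB
  congr 1
  generalize (fun t => PySem.Str.isIn t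
    (PySem.List.pyGetD (pvSplitEq line) 0 "")) = p
  induction pvSkipTokens with
  | nil => rfl
  | cons h t ih => cases hp : p h <;> simp [List.filter, List.any, hp]; simp_all

-- the pending block flushed as A flushes it
def pvFlush (bl br : List String) : List String :=
  if bl.length ≠ 0 then pvFmtBlock bl br else []

theorem pvBGo_unfold (t : List String) :
    pvBGo t =
      pvFlush ((t.takeWhile pvIsAssignB).map pvLeftOf) ((t.takeWhile pvIsAssignB).map pvRightOf)
        ++ pvBGo (t.dropWhile pvIsAssignB) := by
  cases t with
  | nil => simp [pvBGo, pvFlush]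
  | cons h t =>
    cases hh : pvIsAssignB h <;>
      simp [pvBGo, hh, pvFlush]

theorem pvBGo_merge (t : List String) :
    t.takeWhile (fun x => pvIsAssignB x == false)
      ++ pvBGo (t.dropWhile (fun x => pvIsAssignB x == false))
    = pvFlush ((t.takeWhile pvIsAssignB).map pvLeftOf) ((t.takeWhile pvIsAssignB).map pvRightOf)
        ++ pvBGo (t.dropWhile pvIsAssignB) := by
  cases t with
  | nil => simp [pvBGo, pvFlush]
  | cons h t =>
    cases hh : pvIsAssignB h <;>
      simp [pvBGo, hh, pvFlush]

theorem pvMain (lines f bl br : List String) :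
    (if (pvALoop f bl br lines).2.1.length ≠ 0 then
        (pvALoop f bl br lines).1 ++ pvFmtBlock (pvALoop f bl br lines).2.1 (pvALoop f bl br lines).2.2
     else (pvALoop f bl br lines).1)
    = f ++ pvFlush (bl ++ (lines.takeWhile pvIsAssignB).map pvLeftOf)
                   (br ++ (lines.takeWhile pvIsAssignB).map pvRightOf)
        ++ pvBGo (lines.dropWhile pvIsAssignB) := by
  induction lines generalizing f bl br with
  | nil =>
    simp only [pvALoop, List.takeWhile_nil, List.dropWhile_nil, List.map_nil, List.append_nil]
    unfold pvFlush
    split <;> simp [pvBGo]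
  | cons l t ih =>
    rw [show pvALoop f bl br (l :: t) =
        (if pvIsAssignA l then
          pvALoop f (bl ++ [pvLeftOf l]) (br ++ [pvRightOf l]) t
        else
          pvALoop ((if bl.length ≠ 0 then f ++ pvFmtBlock bl br else f) ++ [l]) [] [] t)
      from rfl]
    rw [pvPred_eq]
    cases hl : pvIsAssignB l with
    | true =>
      simp only [if_true]
      rw [ih]
      simp [hl]
    | false =>
      simp only [Bool.false_eq_true, if_false]
      rw [ih]
      have hflush : (if bl.length ≠ 0 then f ++ pvFmtBlock bl br else f) = f ++ pvFlush bl br := by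
        unfold pvFlush; split <;> simp
      rw [hflush]
      have hgo : pvBGo (l :: t)
          = l :: (t.takeWhile (fun x => pvIsAssignB x == false)
              ++ pvBGo (t.dropWhile (fun x => pvIsAssignB x == false))) := by
        simp [pvBGo, hl]
      simp only [List.takeWhile_cons, List.dropWhile_cons, hl, Bool.false_eq_true, if_false,
        List.map_nil, List.append_nil, hgo, pvBGo_merge]
      simp [pvFlush]

-- ===== VERDICT (by name: the statement is the Claim_ definition above) =====
theorem format_assignments_spec : Claim_equal_format_assignments := by
  intro text _
  unfold Spec_format_assignments format_assignments format_assignments_alt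
  simp only [pvMain, List.nil_append]
  rw [pvBGo_unfold (pvSplitNL text)]
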